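-- pv_equiv track=rewrite | github.com/Umwelt32/QuickCode | Algos/Python/MDBU_python/model_view.py | getRgbByGray
-- ===== SOURCE A (Python) =====
-- def getRgbByGray(val):
--     RGB = (0,0,0)
--     color_map = [[50,[50,50,255]], [75,[100,100,200]], [100,[200,150,50]], [120,[200,150,0]], [160,[0,150,50]], [200,[0,64,10]],[220,[255,255,200]],[240,[255,255,255]]]
--     for color in color_map:
--         if int(val) <= int(color[0]):
--             RGB=(color[1][0],color[1][1],color[1][2])
--             break
--     BGR = (RGB[2],RGB[1],RGB[0])
--     return BGR
-- ===== SOURCE B (Python) =====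
-- def getRgbByGray(val):
--     thresholds = [50, 75, 100, 120, 160, 200, 220, 240]
--     colors = [[50, 50, 255], [100, 100, 200], [200, 150, 50], [200, 150, 0],
--               [0, 150, 50], [0, 64, 10], [255, 255, 200], [255, 255, 255]]
--     x = int(val)
--     lo, hi = 0, len(thresholds)
--     while lo < hi:
--         mid = (lo + hi) // 2
--         if thresholds[mid] < x:
--             lo = mid + 1
--         else:
--             hi = mid
--     if lo < len(thresholds):
--         rgb = colors[lo]
--     else:
--         rgb = [0, 0, 0]
--     return (rgb[2], rgb[1], rgb[0])
-- ===== Notes on version B (the rewrite author's own statement) =====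
-- stated objective: alternative
-- what changed: Replaced A's linear first-match scan over the color map with a bisect_left-style binary search over a sorted threshold table, then a single indexed lookup into a parallel color table.
import Mathlib
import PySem

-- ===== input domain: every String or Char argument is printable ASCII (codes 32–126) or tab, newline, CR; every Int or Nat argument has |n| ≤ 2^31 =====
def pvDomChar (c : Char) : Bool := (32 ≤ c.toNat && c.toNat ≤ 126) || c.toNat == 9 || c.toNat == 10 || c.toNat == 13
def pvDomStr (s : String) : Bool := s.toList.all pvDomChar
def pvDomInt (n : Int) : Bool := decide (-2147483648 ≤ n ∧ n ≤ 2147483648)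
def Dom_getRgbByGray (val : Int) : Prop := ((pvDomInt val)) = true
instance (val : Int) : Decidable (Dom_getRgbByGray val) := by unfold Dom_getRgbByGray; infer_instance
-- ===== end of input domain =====

-- B replaces A's linear first-match scan with a bisect_left binary search over the sorted threshold table (alternative algorithm, same result).


-- ===== PORT A =====
-- A's for-loop with break: structural recursion over the color_map list.
def getRgbByGrayLoop (val : Int) (cm : List (Int × (Int × Int × Int))) (rgb : Int × Int × Int) : Int × Int × Int :=
  match cm with
  | [] => rgb
  | c :: rest => if val ≤ c.1 then (c.2.1, c.2.2.1, c.2.2.2) else getRgbByGrayLoop val rest rgb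

def getRgbByGray (val : Int) : Int × Int × Int :=
  let RGB : Int × Int × Int := (0, 0, 0)
  let color_map : List (Int × (Int × Int × Int)) :=
    [(50, (50, 50, 255)), (75, (100, 100, 200)), (100, (200, 150, 50)), (120, (200, 150, 0)),
     (160, (0, 150, 50)), (200, (0, 64, 10)), (220, (255, 255, 200)), (240, (255, 255, 255))]
  let RGB := getRgbByGrayLoop val color_map RGB
  (RGB.2.2, RGB.2.1, RGB.1)

-- ===== PORT B =====
-- Source B's hand-written bisect_left while-loop: recursion on hi - lo.
def bisectLeftLoop (ts : List Int) (x : Int) (lo hi : Nat) : Nat :=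
  if h : lo < hi then
    let mid := (lo + hi) / 2
    if ts.getD mid 0 < x then bisectLeftLoop ts x (mid + 1) hi
    else bisectLeftLoop ts x lo mid
  else lo
termination_by hi - lo
decreasing_by all_goals omega

def getRgbByGray_alt (val : Int) : Int × Int × Int :=
  let thresholds : List Int := [50, 75, 100, 120, 160, 200, 220, 240]
  let colors : List (Int × Int × Int) :=
    [(50, 50, 255), (100, 100, 200), (200, 150, 50), (200, 150, 0),
     (0, 150, 50), (0, 64, 10), (255, 255, 200), (255, 255, 255)]
  let lo := bisectLeftLoop thresholds val 0 thresholds.length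
  let rgb := if lo < thresholds.length then colors.getD lo (0, 0, 0) else (0, 0, 0)
  (rgb.2.2, rgb.2.1, rgb.1)

-- ===== PRECONDITION & SPEC =====
def Spec_getRgbByGray (val : Int) (out : Int × Int × Int) : Prop := out = getRgbByGray_alt val
instance (val : Int) (out : Int × Int × Int) : Decidable (Spec_getRgbByGray val out) := by unfold Spec_getRgbByGray; infer_instance

-- ===== CLAIM (what is proved, stated in full; the proofs are below) =====
def Claim_equal_getRgbByGray : Prop := ∀ (val : Int), Dom_getRgbByGray val → Spec_getRgbByGray val (getRgbByGray val)

-- ===== LEMMAS AND PROOFS =====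
-- Both sides reduce to nested comparisons of val against the literal thresholds:
-- simp unfolds the loop of A and the (depth-bounded, literal lo/hi) binary search of B,
-- split_ifs enumerates the intervals, omega kills the contradictory combinations.

-- ===== VERDICT (by name: the statement is the Claim_ definition above) =====
theorem getRgbByGray_spec : Claim_equal_getRgbByGray := by
  intro val _
  unfold Spec_getRgbByGray
  simp only [getRgbByGray, getRgbByGray_alt, getRgbByGrayLoop]
  simp [bisectLeftLoop]
  split_ifs <;> first | rfl | omega | simp
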